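-- pv_equiv track=rewrite | github.com/S00ahKim/algorithm-python | chocolate.py | get_chocolate
-- ===== SOURCE A (Python) =====
-- def get_chocolate(string):
--     result = list(string)
--     chocolate = 0
--     acc = 0
--
--     for r in result:
--         if r == 'O':
--             acc += 1
--             chocolate += acc
--         else:
--             acc = 0
--     return chocolate
-- ===== SOURCE B (Python) =====
-- from itertools import groupby
--
-- def get_chocolate(string):
--     total = 0
--     for ch, grp in groupby(string):
--         if ch == 'O':
--             n = sum(1 for _ in grp)
--             total += n * (n + 1) // 2
--     return total
-- ===== Notes on version B (the rewrite author's own statement) =====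
-- stated objective: alternative
-- what changed: Instead of per-character accumulation of a running streak counter, B splits the string into maximal runs with itertools.groupby and adds each 'O'-run's triangular number n*(n+1)//2 in closed form.
import Mathlib
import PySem

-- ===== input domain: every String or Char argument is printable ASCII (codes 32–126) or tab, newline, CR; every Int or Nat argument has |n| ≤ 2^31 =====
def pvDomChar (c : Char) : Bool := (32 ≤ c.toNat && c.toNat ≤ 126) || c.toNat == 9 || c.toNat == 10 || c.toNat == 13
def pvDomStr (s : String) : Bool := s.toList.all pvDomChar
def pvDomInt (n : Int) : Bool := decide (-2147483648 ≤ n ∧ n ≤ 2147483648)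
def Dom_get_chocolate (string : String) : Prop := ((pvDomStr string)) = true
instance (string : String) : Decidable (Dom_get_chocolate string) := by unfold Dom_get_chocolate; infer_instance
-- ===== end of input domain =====

-- B replaces A's per-character streak accumulation by itertools.groupby runs,
-- adding each maximal 'O'-run's triangular number n*(n+1)//2 in closed form (objective: alternative).


-- ===== PORT A =====
-- for r in result: if r == 'O': acc += 1; chocolate += acc else acc = 0
def get_chocolate (string : String) : Int :=
  let result := string.toList
  (result.foldl
    (fun (st : Int × Int) r =>
      if r = 'O' then (st.1 + (st.2 + 1), st.2 + 1) else (st.1, 0))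
    (0, 0)).1

-- ===== PORT B =====
-- groupby: peel the maximal run of the head character; returns (extra length beyond head, rest)
def runLen (c : Char) : List Char → Nat × List Char
  | [] => (0, [])
  | x :: xs => if x = c then ((runLen c xs).1 + 1, (runLen c xs).2) else (0, x :: xs)

theorem runLen_rest_le (c : Char) (xs : List Char) : (runLen c xs).2.length ≤ xs.length := by
  induction xs with
  | nil => simp [runLen]
  | cons x xs ih =>
    simp only [runLen]
    split
    · simpa using Nat.le_succ_of_le ih
    · simp

-- for ch, grp in groupby(string): if ch == 'O': total += n*(n+1)//2
def altGo : List Char → Int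
  | [] => 0
  | x :: xs =>
    let n : Int := ((runLen x xs).1 : Int) + 1
    (if x = 'O' then PySem.Int.floordiv (n * (n + 1)) 2 else 0) + altGo (runLen x xs).2
termination_by l => l.length
decreasing_by simpa using Nat.lt_succ_of_le (runLen_rest_le x xs)

def get_chocolate_alt (string : String) : Int := altGo string.toList

-- ===== PRECONDITION & SPEC =====
def Spec_get_chocolate (string : String) (out : Int) : Prop := out = get_chocolate_alt string
instance (string : String) (out : Int) : Decidable (Spec_get_chocolate string out) := by unfold Spec_get_chocolate; infer_instance

-- ===== CLAIM (what is proved, stated in full; the proofs are below) =====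
def Claim_equal_get_chocolate : Prop := ∀ (string : String), Dom_get_chocolate string → Spec_get_chocolate string (get_chocolate string)

-- ===== LEMMAS AND PROOFS =====

-- A's loop as recursion on the list, tracking the running streak a
def Ago (a : Int) : List Char → Int
  | [] => 0
  | x :: xs => if x = 'O' then (a + 1) + Ago (a + 1) xs else Ago 0 xs

theorem foldl_eq_Ago (l : List Char) (c a : Int) :
    (l.foldl
      (fun (st : Int × Int) r =>
        if r = 'O' then (st.1 + (st.2 + 1), st.2 + 1) else (st.1, 0))
      (c, a)).1 = c + Ago a l := by
  induction l generalizing c a with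
  | nil => simp [Ago]
  | cons x xs ih =>
    simp only [List.foldl_cons, Ago]
    split
    · rw [ih]; ring
    · rw [ih]

theorem Ago_head_ne_O (a : Int) (r : List Char) (h : ∀ y, r.head? = some y → y ≠ 'O') :
    Ago a r = Ago 0 r := by
  cases r with
  | nil => rfl
  | cons x xs => have := h x rfl; simp [Ago, this]

def T : Nat → Int
  | 0 => 0
  | n + 1 => T n + (n + 1)

theorem two_T (n : Nat) : 2 * T n = (n : Int) * (n + 1) := by
  induction n with
  | zero => rfl
  | succ n ih => simp only [T]; push_cast; ring_nf; ring_nf at ih; omega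

theorem T_eq_floordiv (n : Nat) :
    PySem.Int.floordiv ((n : Int) * ((n : Int) + 1)) 2 = T n := by
  rw [PySem.Int.floordiv_eq_ediv_of_pos (by omega), ← two_T n]
  exact Int.mul_ediv_cancel_left _ (by norm_num)

theorem Ago_Orun (n : Nat) (a : Int) (r : List Char) :
    Ago a (List.replicate n 'O' ++ r) = (n : Int) * a + T n + Ago (a + n) r := by
  induction n generalizing a with
  | zero => simp [T]
  | succ n ih =>
    simp only [List.replicate_succ, List.cons_append, Ago, ih (a + 1)]
    have h : a + 1 + (n : Int) = a + ((n : Nat) + 1 : Nat) := by push_cast; ring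
    rw [h]
    simp only [T]
    push_cast
    ring

theorem Ago_nonOrun (n : Nat) (c : Char) (hc : ¬ c = 'O') (r : List Char) :
    Ago 0 (List.replicate n c ++ r) = Ago 0 r := by
  induction n with
  | zero => simp
  | succ n ih => simp [List.replicate_succ, Ago, hc, ih]

theorem runLen_spec (c : Char) (xs : List Char) :
    xs = List.replicate (runLen c xs).1 c ++ (runLen c xs).2 ∧
    (∀ y, (runLen c xs).2.head? = some y → y ≠ c) := by
  induction xs with
  | nil => simp [runLen]
  | cons x xs ih =>
    by_cases h : x = c
    · subst h
      have hr : runLen x (x :: xs) = ((runLen x xs).1 + 1, (runLen x xs).2) := by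
        simp [runLen]
      rw [hr]
      exact ⟨by rw [List.replicate_succ, List.cons_append, ← ih.1], ih.2⟩
    · simp [runLen, h]

theorem Ago_eq_altGo (l : List Char) : Ago 0 l = altGo l := by
  induction l using altGo.induct with
  | case1 => simp [Ago, altGo]
  | case2 x xs ih =>
    obtain ⟨hsplit, hhead⟩ := runLen_spec x xs
    rw [altGo]
    by_cases hx : x = 'O'
    · subst hx
      have hx' : ('O' :: xs) = List.replicate ((runLen 'O' xs).1 + 1) 'O' ++ (runLen 'O' xs).2 := by
        rw [List.replicate_succ, List.cons_append, ← hsplit]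
      rw [hx', Ago_Orun, Ago_head_ne_O _ _ hhead, ih, if_pos rfl]
      have hT := T_eq_floordiv ((runLen 'O' xs).1 + 1)
      push_cast at hT ⊢
      rw [hT]
      ring
    · have hx' : (x :: xs) = List.replicate ((runLen x xs).1 + 1) x ++ (runLen x xs).2 := by
        rw [List.replicate_succ, List.cons_append, ← hsplit]
      rw [hx', Ago_nonOrun _ _ hx, ih, if_neg hx]
      ring

-- ===== VERDICT (by name: the statement is the Claim_ definition above) =====
theorem get_chocolate_spec : Claim_equal_get_chocolate := by
  intro s _
  unfold Spec_get_chocolate get_chocolate get_chocolate_alt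
  rw [foldl_eq_Ago, Ago_eq_altGo]
  ring
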